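-- pv_equiv track=rewrite | github.com/kellim/hangman-api | models.py | check_word_difficulty
-- ===== SOURCE A (Python) =====
-- def check_word_difficulty(secret_word):
--     """ Returns a word difficulty score."""
--     # Add 1 to difficulty for each unique letter
--     unique_letters = ''.join(set(secret_word))
--     difficulty = len(unique_letters)
--     # Add additional points to difficulty for infrequent letters
--     for c in secret_word:
--         if c in "jqxz":
--             difficulty += 4
--         elif c in "bkv":
--             difficulty += 3
--         elif c in "cfgmpwy":
--             difficulty += 2
--     return difficulty
-- ===== SOURCE B (Python) =====
-- def _points(c):
--     if c in "jqxz":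
--         return 4
--     if c in "bkv":
--         return 3
--     if c in "cfgmpwy":
--         return 2
--     return 0
--
--
-- def check_word_difficulty(secret_word):
--     """Returns a word difficulty score."""
--     counts = {}
--     for c in secret_word:
--         counts[c] = counts.get(c, 0) + 1
--     # one point per distinct letter, plus tier points weighted by multiplicity
--     return len(counts) + sum(_points(c) * n for c, n in counts.items())
-- ===== Notes on version B (the rewrite author's own statement) =====
-- stated objective: alternative
-- what changed: B builds a letter-frequency map once and sums points*count over the distinct (letter, count) pairs, instead of A's per-character scan plus a separate set join for uniqueness.
import Mathlib
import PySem

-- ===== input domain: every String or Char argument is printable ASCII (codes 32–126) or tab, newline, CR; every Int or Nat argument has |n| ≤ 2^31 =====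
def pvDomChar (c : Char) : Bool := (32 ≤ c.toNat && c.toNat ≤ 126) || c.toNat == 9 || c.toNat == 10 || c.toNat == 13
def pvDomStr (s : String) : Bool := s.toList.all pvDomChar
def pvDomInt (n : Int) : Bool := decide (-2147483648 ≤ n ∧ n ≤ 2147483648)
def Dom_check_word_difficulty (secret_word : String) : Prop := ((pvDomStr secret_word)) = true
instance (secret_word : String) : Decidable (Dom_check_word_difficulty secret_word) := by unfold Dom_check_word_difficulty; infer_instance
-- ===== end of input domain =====

-- B recomputes A's score from a frequency map of the letters (distinct-letter count
-- plus tier-points times multiplicity) instead of A's per-character scan; same cost.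

-- ===== PORT A =====
-- 'c in "jqxz"' for a single char c is exactly char membership in the string's chars
def check_word_difficulty (secret_word : String) : Int :=
  let unique_letters := PySem.Set.ofList secret_word.toList  -- set(secret_word); only its length is used
  let difficulty : Int := (unique_letters.length : Int)
  secret_word.toList.foldl
    (fun d c =>
      if "jqxz".toList.contains c then d + 4
      else if "bkv".toList.contains c then d + 3
      else if "cfgmpwy".toList.contains c then d + 2
      else d)
    difficulty

-- ===== PORT B =====
def cwdPoints (c : Char) : Int :=
  if "jqxz".toList.contains c then 4
  else if "bkv".toList.contains c then 3
  else if "cfgmpwy".toList.contains c then 2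
  else 0

def check_word_difficulty_alt (secret_word : String) : Int :=
  let counts : PySem.Dict Char Int :=
    secret_word.toList.foldl (fun d c => d.insert c (d.getD c 0 + 1)) PySem.Dict.empty
  (counts.items.length : Int) +
    counts.items.foldl (fun acc p => acc + cwdPoints p.1 * p.2) 0

-- ===== PRECONDITION & SPEC =====
def Spec_check_word_difficulty (secret_word : String) (out : Int) : Prop := out = check_word_difficulty_alt secret_word
instance (secret_word : String) (out : Int) : Decidable (Spec_check_word_difficulty secret_word out) := by unfold Spec_check_word_difficulty; infer_instance

-- ===== CLAIM (what is proved, stated in full; the proofs are below) =====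
def Claim_equal_check_word_difficulty : Prop := ∀ (secret_word : String), Dom_check_word_difficulty secret_word → Spec_check_word_difficulty secret_word (check_word_difficulty secret_word)

-- ===== LEMMAS AND PROOFS =====

-- Σ over a list of (if x = c then p else 0) is p times the count of c
lemma sum_map_ite_count (S : List Char) (c : Char) (p : Int) :
    (S.map (fun k => if k = c then p else 0)).sum = p * (S.count c : Int) := by
  induction S with
  | nil => simp
  | cons a t ih =>
    by_cases h : a = c
    · subst h; simp [ih]; ring
    · simp [h, ih]

-- group-by-count: Σ_{k ∈ set(l)} points k * count_l k = Σ_{x ∈ l} points x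
lemma sum_grouped (l : List Char) :
    ((PySem.Set.ofList l).map (fun k => cwdPoints k * (l.count k : Int))).sum
      = (l.map cwdPoints).sum := by
  induction l using List.reverseRecOn with
  | nil => simp [PySem.Set.ofList]
  | append_singleton t c ih =>
    have hset : PySem.Set.ofList (t ++ [c]) = PySem.Set.add (PySem.Set.ofList t) c := by
      simp [PySem.Set.ofList_append]
    by_cases hc : c ∈ t
    · have hcS : c ∈ PySem.Set.ofList t := (PySem.Set.mem_ofList t c).2 hc
      have hadd : PySem.Set.add (PySem.Set.ofList t) c = PySem.Set.ofList t := by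
        simp [PySem.Set.add, hc]
      rw [hset, hadd]
      have hsplit : ∀ k : Char,
          cwdPoints k * (((t ++ [c]).count k : Nat) : Int)
            = cwdPoints k * (t.count k : Int) + (if k = c then cwdPoints c else 0) := by
        intro k
        by_cases hk : k = c
        · subst hk; simp [List.count_append]; ring
        · simp [List.count_append, hk, Ne.symm hk]
      calc ((PySem.Set.ofList t).map
              (fun k => cwdPoints k * ((t ++ [c]).count k : Int))).sum
          = ((PySem.Set.ofList t).map
              (fun k => cwdPoints k * (t.count k : Int) + (if k = c then cwdPoints c else 0))).sum := by
            exact congrArg List.sum (List.map_congr_left (fun k _ => hsplit k))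
        _ = ((PySem.Set.ofList t).map (fun k => cwdPoints k * (t.count k : Int))).sum
              + ((PySem.Set.ofList t).map (fun k => if k = c then cwdPoints c else 0)).sum := by
            rw [← List.sum_map_add]
        _ = (t.map cwdPoints).sum + cwdPoints c := by
            rw [ih, sum_map_ite_count]
            have h1 : List.count c (PySem.Set.ofList t) = 1 :=
              List.count_eq_one_of_mem (PySem.Set.nodup_ofList t) hcS
            simp [h1]
        _ = ((t ++ [c]).map cwdPoints).sum := by simp
    · have hcS : c ∉ PySem.Set.ofList t := fun h => hc ((PySem.Set.mem_ofList t c).1 h)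
      have hadd : PySem.Set.add (PySem.Set.ofList t) c = PySem.Set.ofList t ++ [c] := by
        simp [PySem.Set.add, hc]
      rw [hset, hadd, List.map_append, List.sum_append]
      have hcount : ∀ k ∈ PySem.Set.ofList t, (t ++ [c]).count k = t.count k := by
        intro k hk
        have : k ≠ c := fun h => hcS (h ▸ hk)
        simp [List.count_append, Ne.symm this]
      have hmap : (PySem.Set.ofList t).map (fun k => cwdPoints k * ((t ++ [c]).count k : Int))
          = (PySem.Set.ofList t).map (fun k => cwdPoints k * (t.count k : Int)) :=
        List.map_congr_left (fun k hk => by rw [hcount k hk])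
      rw [hmap, ih]
      have : (t ++ [c]).count c = t.count c + 1 := by simp [List.count_append]
      simp [List.count_eq_zero_of_not_mem hc]

theorem check_word_difficulty_eq (s : String) :
    check_word_difficulty s = check_word_difficulty_alt s := by
  simp only [check_word_difficulty, check_word_difficulty_alt]
  rw [PySem.Dict.foldl_insert_getD_add_one_eq_counter]
  have hA : (fun (d : Int) (c : Char) =>
      if "jqxz".toList.contains c then d + 4
      else if "bkv".toList.contains c then d + 3
      else if "cfgmpwy".toList.contains c then d + 2
      else d) = fun d c => d + cwdPoints c := by
    funext d c
    unfold cwdPoints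
    split_ifs <;> ring
  rw [hA]
  simp only [PySem.List.foldl_add]
  rw [PySem.Dict.items_counter]
  simp only [List.map_map, List.length_map, Function.comp_def, zero_add]
  rw [sum_grouped]

-- ===== VERDICT (by name: the statement is the Claim_ definition above) =====
theorem check_word_difficulty_spec : Claim_equal_check_word_difficulty := by
  intro s _
  unfold Spec_check_word_difficulty
  exact check_word_difficulty_eq s
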